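-- pv_equiv track=rewrite | github.com/KoshMar13/HT5 | 3.py | anyWin
-- ===== SOURCE A (Python) =====
-- def anyWin(lst, player):
--     win = None
--     n = len(lst)
--
--     # Проверка горизонталей
--     for i in range(n):
--         win = True
--         for j in range(n):
--             if lst[i][j] != player:
--                 win = False
--                 break
--         if win:
--             return win
--     # Проверка вертикалей
--     for i in range(n):
--         win = True
--         for j in range(n):
--             if lst[j][i] != player:
--                 win = False
--                 break
--         if win:
--             return win
--     # Проверка диагоналей
--     win = True
--     for i in range(n):
--         if lst[i][i] != player:
--             win = False
--             break
--     if win: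
--         return win
--
--     win = True
--     for i in range(n):
--         if lst[i][n - 1 - i] != player:
--             win = False
--             break
--     if win:
--         return win
--     return False
--
--     for row in lst:
--         for i in row:
--             if i == '-':
--                 return False
--     return True
-- ===== SOURCE B (Python) =====
-- def anyWin(lst, player):
--     # One pass over the board maintaining match counters per row, per column
--     # and for both diagonals; a line wins iff its counter reaches n.
--     n = len(lst)
--     rowc = [0] * n
--     colc = [0] * n
--     d1 = d2 = 0
--     for i in range(n):
--         for j in range(n):
--             if lst[i][j] == player:
--                 rowc[i] += 1
--                 colc[j] += 1
--                 if i == j: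
--                     d1 += 1
--                 if i + j == n - 1:
--                     d2 += 1
--     return n in rowc or n in colc or d1 == n or d2 == n
-- ===== Notes on version B (the rewrite author's own statement) =====
-- stated objective: alternative
-- what changed: A makes four staged scans (rows, columns, main diagonal, anti-diagonal) each with a win flag, break and early return; B makes ONE pass over the cells maintaining per-row and per-column match counters plus two diagonal counters, and decides at the end by checking whether any counter reached n.
-- outside the precondition, e.g. on anyWin([['O'], ['X', 'X']], 'X'): A returns True, B raises IndexError
import Mathlib
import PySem

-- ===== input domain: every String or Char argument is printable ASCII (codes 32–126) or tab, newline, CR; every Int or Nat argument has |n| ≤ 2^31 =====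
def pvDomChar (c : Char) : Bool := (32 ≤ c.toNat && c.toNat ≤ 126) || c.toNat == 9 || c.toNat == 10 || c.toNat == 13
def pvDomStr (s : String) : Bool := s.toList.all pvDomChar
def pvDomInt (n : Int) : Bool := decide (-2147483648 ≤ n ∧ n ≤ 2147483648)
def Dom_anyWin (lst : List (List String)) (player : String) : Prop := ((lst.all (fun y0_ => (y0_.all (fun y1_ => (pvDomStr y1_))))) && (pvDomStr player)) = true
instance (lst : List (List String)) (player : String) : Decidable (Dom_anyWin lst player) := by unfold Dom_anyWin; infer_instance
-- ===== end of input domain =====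

-- B replaces A's four staged line scans (flags, breaks, early returns) by ONE pass over the cells
-- maintaining per-row/per-column/diagonal match counters; return-value equivalence on boards whose
-- rows all have length ≥ len(lst).

-- ===== PORT A =====
-- lst[i][j], shared by both ports (inside Pre_ every access either Python performs is in range; "" is a dummy for the out-of-range case)
def cell (lst : List (List String)) (i j : Int) : String :=
  match PySem.List.pyGet? lst i with
  | some row => (PySem.List.pyGet? row j).getD ""
  | none => ""

def anyWin (lst : List (List String)) (player : String) : Bool :=
  let n : Int := lst.length
  let rng := PySem.List.pyRange 0 n 1
  -- horizontals: outer loop with early return = any, inner loop with win flag and break = all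
  if rng.any (fun i => rng.all (fun j => cell lst i j == player)) then true
  -- verticals
  else if rng.any (fun i => rng.all (fun j => cell lst j i == player)) then true
  -- main diagonal
  else if rng.all (fun i => cell lst i i == player) then true
  -- anti-diagonal
  else if rng.all (fun i => cell lst i (n - 1 - i) == player) then true
  else false

-- ===== PORT B =====
-- rowc[i] += 1 (every index B bumps is a nonnegative Int, so .toNat is exact here)
def bump (xs : List Int) (i : Int) : List Int := xs.modify i.toNat (· + 1)

-- the body of B's inner loop: one cell (i, j) updates the four counter components
def cellStep (lst : List (List String)) (player : String) (n i : Int)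
    (st : List Int × List Int × Int × Int) (j : Int) : List Int × List Int × Int × Int :=
  if cell lst i j == player then
    (bump st.1 i, bump st.2.1 j,
     st.2.2.1 + (if i == j then 1 else 0),
     st.2.2.2 + (if i + j == n - 1 then 1 else 0))
  else st

def anyWin_alt (lst : List (List String)) (player : String) : Bool :=
  let n : Int := lst.length
  let r := PySem.List.pyRange 0 n 1
  let st0 : List Int × List Int × Int × Int :=
    (List.replicate lst.length (0 : Int), List.replicate lst.length (0 : Int), 0, 0)
  let st := r.foldl (fun st i => r.foldl (cellStep lst player n i) st) st0
  st.1.contains n || st.2.1.contains n || st.2.2.1 == n || st.2.2.2 == n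

-- ===== PRECONDITION & SPEC =====
-- Pre_ excludes ragged boards with a row shorter than len(lst): there A raises IndexError unless an
-- earlier mismatch breaks first (so it may still return), while B's full pass always raises.
def Pre_anyWin (lst : List (List String)) (player : String) : Prop :=
  ∀ row ∈ lst, lst.length ≤ row.length

instance (lst : List (List String)) (player : String) : Decidable (Pre_anyWin lst player) := by
  unfold Pre_anyWin; infer_instance

def pvWitness_anyWin : List (List String) × String := ([["X", "O"], ["X", "X"]], "X")

def Spec_anyWin (lst : List (List String)) (player : String) (out : Bool) : Prop := out = anyWin_alt lst player
instance (lst : List (List String)) (player : String) (out : Bool) : Decidable (Spec_anyWin lst player out) := by unfold Spec_anyWin; infer_instance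

-- ===== CLAIM (what is proved, stated in full; the proofs are below) =====
def Claim_equal_anyWin : Prop := ∀ (lst : List (List String)) (player : String), Dom_anyWin lst player → Pre_anyWin lst player → Spec_anyWin lst player (anyWin lst player)

-- ===== LEMMAS AND PROOFS =====
theorem bump_length (xs : List Int) (i : Int) : (bump xs i).length = xs.length := by
  simp [bump]

theorem bump_getElem? (xs : List Int) (i : Int) (k : Nat) :
    (bump xs i)[k]? = xs[k]?.map (· + if i.toNat = k then 1 else 0) := by
  simp only [bump, List.getElem?_modify]
  cases xs[k]? with
  | none => simp
  | some v => by_cases h : i.toNat = k <;> simp [h]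

theorem cellStep_pos (lst : List (List String)) (player : String) (n i j : Int)
    (st : List Int × List Int × Int × Int) (hc : (cell lst i j == player) = true) :
    cellStep lst player n i st j =
      (bump st.1 i, bump st.2.1 j,
       st.2.2.1 + (if i = j then 1 else 0),
       st.2.2.2 + (if i + j = n - 1 then 1 else 0)) := by
  simp [cellStep, hc]

theorem cellStep_neg (lst : List (List String)) (player : String) (n i j : Int)
    (st : List Int × List Int × Int × Int) (hc : ¬ (cell lst i j == player) = true) :
    cellStep lst player n i st j = st := by
  simp [cellStep]; intro h; exact absurd (by simp [h]) hc

theorem inner_char (lst : List (List String)) (player : String) (n i : Int) (N : Nat)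
    (st : List Int × List Int × Int × Int) :
    ((List.range N).foldl (fun s (k : Nat) => cellStep lst player n i s (k : Int)) st).1.length = st.1.length ∧
    ((List.range N).foldl (fun s (k : Nat) => cellStep lst player n i s (k : Int)) st).2.1.length = st.2.1.length ∧
    (∀ k : Nat, ((List.range N).foldl (fun s (k : Nat) => cellStep lst player n i s (k : Int)) st).1[k]? =
      st.1[k]?.map (· + if i.toNat = k then (((List.range N).countP (fun (j : Nat) => cell lst i (j : Int) == player) : Nat) : Int) else 0)) ∧
    (∀ k : Nat, ((List.range N).foldl (fun s (k : Nat) => cellStep lst player n i s (k : Int)) st).2.1[k]? =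
      st.2.1[k]?.map (· + if k < N ∧ (cell lst i (k : Int) == player) = true then 1 else 0)) ∧
    ((List.range N).foldl (fun s (k : Nat) => cellStep lst player n i s (k : Int)) st).2.2.1 =
      st.2.2.1 + (if 0 ≤ i ∧ i < (N : Int) ∧ (cell lst i i == player) = true then 1 else 0) ∧
    ((List.range N).foldl (fun s (k : Nat) => cellStep lst player n i s (k : Int)) st).2.2.2 =
      st.2.2.2 + (if 0 ≤ n - 1 - i ∧ n - 1 - i < (N : Int) ∧ (cell lst i (n - 1 - i) == player) = true then 1 else 0) := by
  induction N with
  | zero =>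
    refine ⟨rfl, rfl, by simp, by simp, ?_, ?_⟩ <;>
      · rw [if_neg (by intro h; omega)]; simp
  | succ N ih =>
    obtain ⟨h1, h2, h3, h4, h5, h6⟩ := ih
    simp only [List.range_succ, List.foldl_append, List.foldl_cons, List.foldl_nil]
    by_cases hc : (cell lst i (N : Int) == player) = true
    · rw [cellStep_pos lst player n i (N : Int) _ hc]
      refine ⟨by simp [bump_length, h1], by simp [bump_length, h2], ?_, ?_, ?_, ?_⟩
      · intro k
        rw [bump_getElem?, h3]
        cases hst : st.1[k]? with
        | none => simp
        | some v =>
          simp only [Option.map_some, Option.map_map, Function.comp]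
          by_cases hik : i.toNat = k <;>
            simp [hik, List.countP_append, hc, List.countP_cons] <;> omega
      · intro k
        rw [bump_getElem?, h4]
        cases hst : st.2.1[k]? with
        | none => simp
        | some v =>
          simp only [Option.map_some, Option.map_map, Function.comp]
          by_cases hk : k < N
          · have hne : ¬ ((N : Int).toNat = k) := by omega
            have hk1 : k < N + 1 := by omega
            have hNk : ¬ N = k := by omega
            simp [hk, hne, hk1, hNk]
          · by_cases hkN : k = N
            · subst hkN
              simp [hk, hc, Nat.lt_succ_self]
            · have ha : ¬ ((N : Int).toNat = k) := by omega
              have hb : ¬ (k < N + 1) := by omega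
              have hNk : ¬ N = k := by omega
              simp [hk, ha, hb, hNk]
      · -- d1 component, matching cell at (i, N)
        rw [h5]
        by_cases h : i = (N : Int)
        · have hold : ¬ (0 ≤ i ∧ i < (N : Int) ∧ (cell lst i i == player) = true) :=
            fun hh => absurd hh.2.1 (by rw [h]; omega)
          have hnew : 0 ≤ i ∧ i < ((N + 1 : Nat) : Int) ∧ (cell lst i i == player) = true :=
            ⟨by rw [h]; omega, by rw [h]; push_cast; omega, by rw [← h] at hc; exact hc⟩
          rw [if_pos h, if_neg hold, if_pos hnew]; ring
        · have heq : (0 ≤ i ∧ i < ((N + 1 : Nat) : Int) ∧ (cell lst i i == player) = true) ↔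
              (0 ≤ i ∧ i < (N : Int) ∧ (cell lst i i == player) = true) := by
            constructor
            · rintro ⟨a, b, c⟩; exact ⟨a, by push_cast at b; omega, c⟩
            · rintro ⟨a, b, c⟩; exact ⟨a, by push_cast; omega, c⟩
          rw [if_neg h]; simp only [heq]; ring
      · -- d2 component, matching cell at (i, N)
        rw [h6]
        by_cases h : i + (N : Int) = n - 1
        · have hold : ¬ (0 ≤ n - 1 - i ∧ n - 1 - i < (N : Int) ∧ (cell lst i (n - 1 - i) == player) = true) :=
            fun hh => absurd hh.2.1 (by omega)
          have hnew : 0 ≤ n - 1 - i ∧ n - 1 - i < ((N + 1 : Nat) : Int) ∧ (cell lst i (n - 1 - i) == player) = true :=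
            ⟨by omega, by push_cast; omega, by rw [show n - 1 - i = (N : Int) by omega]; exact hc⟩
          rw [if_pos h, if_neg hold, if_pos hnew]; ring
        · have heq : (0 ≤ n - 1 - i ∧ n - 1 - i < ((N + 1 : Nat) : Int) ∧ (cell lst i (n - 1 - i) == player) = true) ↔
              (0 ≤ n - 1 - i ∧ n - 1 - i < (N : Int) ∧ (cell lst i (n - 1 - i) == player) = true) := by
            constructor
            · rintro ⟨a, b, c⟩; exact ⟨a, by push_cast at b; omega, c⟩
            · rintro ⟨a, b, c⟩; exact ⟨a, by push_cast; omega, c⟩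
          rw [if_neg h]; simp only [heq]; ring
    · rw [cellStep_neg lst player n i (N : Int) _ hc]
      refine ⟨h1, h2, ?_, ?_, ?_, ?_⟩
      · intro k
        rw [h3]
        cases hst : st.1[k]? <;>
          simp [List.countP_append, List.countP_cons, hc]
      · intro k
        rw [h4]
        by_cases hk1 : k < N + 1
        · by_cases hk : k < N
          · simp [hk, hk1]
          · have hkN : k = N := by omega
            subst hkN
            simp [hk, hk1, hc]
        · have hk : ¬ k < N := by omega
          simp [hk, hk1]
      · rw [h5]
        congr 1
        have heq : (0 ≤ i ∧ i < ((N + 1 : Nat) : Int) ∧ (cell lst i i == player) = true) ↔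
            (0 ≤ i ∧ i < (N : Int) ∧ (cell lst i i == player) = true) := by
          constructor
          · rintro ⟨a, b, c⟩
            refine ⟨a, ?_, c⟩
            by_cases h : i = (N : Int)
            · rw [← h] at hc; exact absurd c hc
            · push_cast at b; omega
          · rintro ⟨a, b, c⟩; exact ⟨a, by push_cast; omega, c⟩
        simp only [heq]
      · rw [h6]
        congr 1
        have heq : (0 ≤ n - 1 - i ∧ n - 1 - i < ((N + 1 : Nat) : Int) ∧ (cell lst i (n - 1 - i) == player) = true) ↔
            (0 ≤ n - 1 - i ∧ n - 1 - i < (N : Int) ∧ (cell lst i (n - 1 - i) == player) = true) := by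
          constructor
          · rintro ⟨a, b, c⟩
            refine ⟨a, ?_, c⟩
            by_cases h : n - 1 - i = (N : Int)
            · rw [← h] at hc; exact absurd c hc
            · push_cast at b; omega
          · rintro ⟨a, b, c⟩; exact ⟨a, by push_cast; omega, c⟩
        simp only [heq]

theorem outer_char (lst : List (List String)) (player : String) (n : Int) (m M : Nat)
    (st : List Int × List Int × Int × Int) :
    ((List.range M).foldl (fun s (a : Nat) => (List.range m).foldl
        (fun s' (k : Nat) => cellStep lst player n (a : Int) s' (k : Int)) s) st).1.length = st.1.length ∧
    ((List.range M).foldl (fun s (a : Nat) => (List.range m).foldl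
        (fun s' (k : Nat) => cellStep lst player n (a : Int) s' (k : Int)) s) st).2.1.length = st.2.1.length ∧
    (∀ k : Nat, ((List.range M).foldl (fun s (a : Nat) => (List.range m).foldl
        (fun s' (k : Nat) => cellStep lst player n (a : Int) s' (k : Int)) s) st).1[k]? =
      st.1[k]?.map (· + if k < M then (((List.range m).countP (fun (j : Nat) => cell lst (k : Int) (j : Int) == player) : Nat) : Int) else 0)) ∧
    (∀ k : Nat, ((List.range M).foldl (fun s (a : Nat) => (List.range m).foldl
        (fun s' (k : Nat) => cellStep lst player n (a : Int) s' (k : Int)) s) st).2.1[k]? =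
      st.2.1[k]?.map (· + if k < m then (((List.range M).countP (fun (a : Nat) => cell lst (a : Int) (k : Int) == player) : Nat) : Int) else 0)) ∧
    ((List.range M).foldl (fun s (a : Nat) => (List.range m).foldl
        (fun s' (k : Nat) => cellStep lst player n (a : Int) s' (k : Int)) s) st).2.2.1 =
      st.2.2.1 + (((List.range M).countP (fun (a : Nat) => decide (a < m) && (cell lst (a : Int) (a : Int) == player)) : Nat) : Int) ∧
    ((List.range M).foldl (fun s (a : Nat) => (List.range m).foldl
        (fun s' (k : Nat) => cellStep lst player n (a : Int) s' (k : Int)) s) st).2.2.2 =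
      st.2.2.2 + (((List.range M).countP (fun (a : Nat) =>
        decide (0 ≤ n - 1 - (a : Int)) && decide (n - 1 - (a : Int) < (m : Int)) && (cell lst (a : Int) (n - 1 - (a : Int)) == player)) : Nat) : Int) := by
  induction M with
  | zero => simp
  | succ M ih =>
    obtain ⟨h1, h2, h3, h4, h5, h6⟩ := ih
    simp only [List.range_succ, List.foldl_append, List.foldl_cons, List.foldl_nil]
    obtain ⟨g1, g2, g3, g4, g5, g6⟩ := inner_char lst player n (M : Int) m
      ((List.range M).foldl (fun s (a : Nat) => (List.range m).foldl
        (fun s' (k : Nat) => cellStep lst player n (a : Int) s' (k : Int)) s) st)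
    refine ⟨by rw [g1, h1], by rw [g2, h2], ?_, ?_, ?_, ?_⟩
    · intro k
      rw [g3 k, h3 k]
      cases hst : st.1[k]? with
      | none => simp
      | some v =>
        simp only [Option.map_some, Option.map_map, Function.comp]
        by_cases hk : k < M
        · have hne : ¬ M = k := by omega
          have hk1 : k < M + 1 := by omega
          simp [hk, hne, hk1]
        · by_cases hkM : k = M
          · subst hkM
            simp [hk, Nat.lt_succ_self]
          · have ha : ¬ M = k := by omega
            have hb : ¬ (k < M + 1) := by omega
            simp [hk, ha, hb]
    · intro k
      rw [g4 k, h4 k]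
      cases hst : st.2.1[k]? with
      | none => simp
      | some v =>
        simp only [Option.map_some, Option.map_map, Function.comp]
        by_cases hk : k < m
        · simp only [List.countP_append, List.countP_singleton]
          by_cases hf : (cell lst (M : Int) (k : Int) == player) = true <;>
            simp [hk, hf] <;> push_cast <;> ring
        · simp [hk]
    · rw [g5, h5]
      have hpm : ((decide (M < m) && (cell lst (M : Int) (M : Int) == player)) = true) ↔
          (0 ≤ (M : Int) ∧ (M : Int) < (m : Int) ∧ (cell lst (M : Int) (M : Int) == player) = true) := by
        simp only [Bool.and_eq_true, decide_eq_true_eq]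
        constructor
        · rintro ⟨h1, h2⟩; exact ⟨by omega, by exact_mod_cast h1, h2⟩
        · rintro ⟨-, h2, h3⟩; exact ⟨by exact_mod_cast h2, h3⟩
      have hsing : (if 0 ≤ (M : Int) ∧ (M : Int) < (m : Int) ∧ (cell lst (M : Int) (M : Int) == player) = true then (1 : Int) else 0) =
          ((List.countP (fun (a : Nat) => decide (a < m) && (cell lst (a : Int) (a : Int) == player)) [M] : Nat) : Int) := by
        rw [List.countP_singleton]
        by_cases hP : 0 ≤ (M : Int) ∧ (M : Int) < (m : Int) ∧ (cell lst (M : Int) (M : Int) == player) = true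
        · rw [if_pos hP, if_pos (hpm.mpr hP)]; simp
        · rw [if_neg hP, if_neg (fun hb => hP (hpm.mp hb))]; simp
      rw [List.countP_append, hsing]
      push_cast
      ring
    · rw [g6, h6]
      have hpm : ((decide (0 ≤ n - 1 - (M : Int)) && decide (n - 1 - (M : Int) < (m : Int)) && (cell lst (M : Int) (n - 1 - (M : Int)) == player)) = true) ↔
          (0 ≤ n - 1 - (M : Int) ∧ n - 1 - (M : Int) < (m : Int) ∧ (cell lst (M : Int) (n - 1 - (M : Int)) == player) = true) := by
        simp only [Bool.and_eq_true, decide_eq_true_eq, and_assoc]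
      have hsing : (if 0 ≤ n - 1 - (M : Int) ∧ n - 1 - (M : Int) < (m : Int) ∧ (cell lst (M : Int) (n - 1 - (M : Int)) == player) = true then (1 : Int) else 0) =
          ((List.countP (fun (a : Nat) => decide (0 ≤ n - 1 - (a : Int)) && decide (n - 1 - (a : Int) < (m : Int)) && (cell lst (a : Int) (n - 1 - (a : Int)) == player)) [M] : Nat) : Int) := by
        rw [List.countP_singleton]
        by_cases hP : 0 ≤ n - 1 - (M : Int) ∧ n - 1 - (M : Int) < (m : Int) ∧ (cell lst (M : Int) (n - 1 - (M : Int)) == player) = true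
        · rw [if_pos hP, if_pos (hpm.mpr hP)]; simp
        · rw [if_neg hP, if_neg (fun hb => hP (hpm.mp hb))]; simp
      rw [List.countP_append, hsing]
      push_cast
      ring

theorem ifchain_or (a b c d : Bool) :
    (if a = true then true else if b = true then true else if c = true then true
     else if d = true then true else false) = (a || b || c || d) := by
  cases a <;> cases b <;> cases c <;> cases d <;> simp

theorem row_contains (lst : List (List String)) (player : String) :
    ((((List.range lst.length).foldl (fun s (a : Nat) => (List.range lst.length).foldl
        (fun s' (k : Nat) => cellStep lst player (lst.length : Int) (a : Int) s' (k : Int)) s)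
        (List.replicate lst.length (0 : Int), List.replicate lst.length (0 : Int), 0, 0)).1.contains
          ((lst.length : Nat) : Int)) =
      (List.range lst.length).any (fun a => (List.range lst.length).all
        (fun j => cell lst (a : Int) (j : Int) == player))) := by
  obtain ⟨o1, o2, o3, o4, o5, o6⟩ := outer_char lst player (lst.length : Int) lst.length lst.length
    (List.replicate lst.length (0 : Int), List.replicate lst.length (0 : Int), 0, 0)
  rw [Bool.eq_iff_iff, List.contains_iff_mem, List.mem_iff_getElem?, List.any_eq_true]
  constructor
  · rintro ⟨k, hk⟩
    rw [o3 k] at hk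
    simp only [List.getElem?_replicate] at hk
    by_cases hkm : k < lst.length
    · simp only [if_pos hkm, Option.map_some, zero_add, Option.some.injEq] at hk
      have hcnt : (List.range lst.length).countP
          (fun (j : Nat) => cell lst (k : Int) (j : Int) == player) = lst.length := by
        exact_mod_cast hk
      refine ⟨k, List.mem_range.mpr hkm, List.all_eq_true.mpr ?_⟩
      intro j hj
      exact (List.countP_eq_length
        (p := fun (j : Nat) => cell lst (k : Int) (j : Int) == player)).mp (by simp [hcnt]) j hj
    · simp [if_neg hkm] at hk
  · rintro ⟨a, ha, hall⟩
    have ham := List.mem_range.mp ha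
    refine ⟨a, ?_⟩
    rw [o3 a]
    simp only [List.getElem?_replicate, if_pos ham, Option.map_some, zero_add]
    have hcnt : (List.range lst.length).countP
        (fun (j : Nat) => cell lst (a : Int) (j : Int) == player) = lst.length := by
      have := List.countP_eq_length.mpr (List.all_eq_true.mp hall)
      simpa using this
    rw [hcnt]

theorem col_contains (lst : List (List String)) (player : String) :
    ((((List.range lst.length).foldl (fun s (a : Nat) => (List.range lst.length).foldl
        (fun s' (k : Nat) => cellStep lst player (lst.length : Int) (a : Int) s' (k : Int)) s)
        (List.replicate lst.length (0 : Int), List.replicate lst.length (0 : Int), 0, 0)).2.1.contains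
          ((lst.length : Nat) : Int)) =
      (List.range lst.length).any (fun a => (List.range lst.length).all
        (fun j => cell lst (j : Int) (a : Int) == player))) := by
  obtain ⟨o1, o2, o3, o4, o5, o6⟩ := outer_char lst player (lst.length : Int) lst.length lst.length
    (List.replicate lst.length (0 : Int), List.replicate lst.length (0 : Int), 0, 0)
  rw [Bool.eq_iff_iff, List.contains_iff_mem, List.mem_iff_getElem?, List.any_eq_true]
  constructor
  · rintro ⟨k, hk⟩
    rw [o4 k] at hk
    simp only [List.getElem?_replicate] at hk
    by_cases hkm : k < lst.length
    · simp only [if_pos hkm, Option.map_some, zero_add, Option.some.injEq] at hk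
      have hcnt : (List.range lst.length).countP
          (fun (a : Nat) => cell lst (a : Int) (k : Int) == player) = lst.length := by
        exact_mod_cast hk
      refine ⟨k, List.mem_range.mpr hkm, List.all_eq_true.mpr ?_⟩
      intro j hj
      exact (List.countP_eq_length
        (p := fun (a : Nat) => cell lst (a : Int) (k : Int) == player)).mp (by simp [hcnt]) j hj
    · simp [if_neg hkm] at hk
  · rintro ⟨a, ha, hall⟩
    have ham := List.mem_range.mp ha
    refine ⟨a, ?_⟩
    rw [o4 a]
    simp only [List.getElem?_replicate, if_pos ham, Option.map_some, zero_add]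
    have hcnt : (List.range lst.length).countP
        (fun (j : Nat) => cell lst (j : Int) (a : Int) == player) = lst.length := by
      have := List.countP_eq_length.mpr (List.all_eq_true.mp hall)
      simpa using this
    rw [hcnt]

theorem diag_eq (lst : List (List String)) (player : String) :
    ((((List.range lst.length).foldl (fun s (a : Nat) => (List.range lst.length).foldl
        (fun s' (k : Nat) => cellStep lst player (lst.length : Int) (a : Int) s' (k : Int)) s)
        (List.replicate lst.length (0 : Int), List.replicate lst.length (0 : Int), 0, 0)).2.2.1 ==
          ((lst.length : Nat) : Int)) =
      (List.range lst.length).all (fun a => cell lst (a : Int) (a : Int) == player)) := by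
  obtain ⟨o1, o2, o3, o4, o5, o6⟩ := outer_char lst player (lst.length : Int) lst.length lst.length
    (List.replicate lst.length (0 : Int), List.replicate lst.length (0 : Int), 0, 0)
  rw [Bool.eq_iff_iff, beq_iff_eq, o5, List.all_eq_true]
  have hcg : (List.range lst.length).countP
      (fun (a : Nat) => decide (a < lst.length) && (cell lst (a : Int) (a : Int) == player)) =
      (List.range lst.length).countP (fun (a : Nat) => cell lst (a : Int) (a : Int) == player) := by
    refine List.countP_congr ?_
    intro a ha
    simp [List.mem_range.mp ha]
  rw [hcg, zero_add]
  constructor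
  · intro h
    have : (List.range lst.length).countP (fun (a : Nat) => cell lst (a : Int) (a : Int) == player)
        = lst.length := by exact_mod_cast h
    intro a ha
    exact (List.countP_eq_length
      (p := fun (a : Nat) => cell lst (a : Int) (a : Int) == player)).mp (by simp [this]) a ha
  · intro h
    have : (List.range lst.length).countP (fun (a : Nat) => cell lst (a : Int) (a : Int) == player)
        = lst.length := by
      have := List.countP_eq_length.mpr h
      simpa using this
    exact_mod_cast this

theorem adiag_eq (lst : List (List String)) (player : String) :
    ((((List.range lst.length).foldl (fun s (a : Nat) => (List.range lst.length).foldl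
        (fun s' (k : Nat) => cellStep lst player (lst.length : Int) (a : Int) s' (k : Int)) s)
        (List.replicate lst.length (0 : Int), List.replicate lst.length (0 : Int), 0, 0)).2.2.2 ==
          ((lst.length : Nat) : Int)) =
      (List.range lst.length).all (fun a => cell lst (a : Int) ((lst.length : Int) - 1 - (a : Int)) == player)) := by
  obtain ⟨o1, o2, o3, o4, o5, o6⟩ := outer_char lst player (lst.length : Int) lst.length lst.length
    (List.replicate lst.length (0 : Int), List.replicate lst.length (0 : Int), 0, 0)
  rw [Bool.eq_iff_iff, beq_iff_eq, o6, List.all_eq_true]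
  have hcg : (List.range lst.length).countP
      (fun (a : Nat) => decide (0 ≤ (lst.length : Int) - 1 - (a : Int)) &&
        decide ((lst.length : Int) - 1 - (a : Int) < (lst.length : Int)) &&
        (cell lst (a : Int) ((lst.length : Int) - 1 - (a : Int)) == player)) =
      (List.range lst.length).countP
        (fun (a : Nat) => cell lst (a : Int) ((lst.length : Int) - 1 - (a : Int)) == player) := by
    refine List.countP_congr ?_
    intro a ha
    have := List.mem_range.mp ha
    have h1 : 0 ≤ (lst.length : Int) - 1 - (a : Int) := by omega
    have h2 : (lst.length : Int) - 1 - (a : Int) < (lst.length : Int) := by omega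
    simp [h2, this]
  rw [hcg, zero_add]
  constructor
  · intro h
    have hc : (List.range lst.length).countP
        (fun (a : Nat) => cell lst (a : Int) ((lst.length : Int) - 1 - (a : Int)) == player)
        = lst.length := by exact_mod_cast h
    intro a ha
    exact (List.countP_eq_length
      (p := fun (a : Nat) => cell lst (a : Int) ((lst.length : Int) - 1 - (a : Int)) == player)).mp
      (by simp [hc]) a ha
  · intro h
    have hc : (List.range lst.length).countP
        (fun (a : Nat) => cell lst (a : Int) ((lst.length : Int) - 1 - (a : Int)) == player)
        = lst.length := by
      have := List.countP_eq_length.mpr h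
      simpa using this
    exact_mod_cast hc

theorem anyWin_eq_alt (lst : List (List String)) (player : String) :
    anyWin lst player = anyWin_alt lst player := by
  simp only [anyWin, anyWin_alt]
  rw [PySem.List.pyRange_zero_nat lst.length]
  simp only [List.foldl_map, List.any_map, List.all_map, Function.comp_def]
  rw [ifchain_or]
  rw [row_contains, col_contains, diag_eq, adiag_eq]

-- ===== VERDICT (by name: the statement is the Claim_ definition above) =====
theorem anyWin_spec : Claim_equal_anyWin := by
  intro lst player _ _
  unfold Spec_anyWin
  exact anyWin_eq_alt lst player
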